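-- pv_equiv track=rewrite | github.com/2017112513/BOJ-Solution | solution/BOJ_19238.py | search
-- ===== SOURCE A (Python) =====
-- from collections import deque, defaultdict
--
-- def is_inner(N,x,y):
--     if 0<=x<N and 0<=y<N:
--         return True
--     return False
--
-- def search(N,guest,sx,sy,arr):
--
--     search_list = []
--
--     dx = [1,-1,0,0]
--     dy = [0,0,1,-1]
--
--     visited = [[0]*N for _ in range(N)]
--
--     visited[sx][sy] = 1
--
--     d = deque()
--     d.append((0,sx,sy)) # 거리 , Row , Col
--
--     while d:
--         move,x,y = d.popleft()
--
--         if guest[x][y]: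
--             search_list.append([move,x,y])
--
--         for i in range(4):
--             a,b = x+dx[i],y+dy[i]
--             if is_inner(N,a,b) and visited[a][b] == 0 and arr[a][b] != 1:
--
--                 visited[a][b] = 1
--                 d.append((move+1,a,b))
--     if search_list:
--         Z,X,Y = sorted(search_list,key=lambda x: (x[0],x[1],x[2]))[0]
--         return X,Y,Z
--
--     return -1,-1,-1
-- ===== SOURCE B (Python) =====
-- def is_inner(N,x,y):
--     if 0<=x<N and 0<=y<N:
--         return True
--     return False
--
-- def search(N,guest,sx,sy,arr):
--     visited = [[0]*N for _ in range(N)]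
--     visited[sx][sy] = 1
--     frontier = [(sx,sy)]
--     move = 0
--     while frontier:
--         hits = [(x,y) for (x,y) in frontier if guest[x][y]]
--         if hits:
--             x,y = min(hits)
--             return x,y,move
--         nxt = []
--         for x,y in frontier:
--             for a,b in ((x+1,y),(x-1,y),(x,y+1),(x,y-1)):
--                 if is_inner(N,a,b) and visited[a][b] == 0 and arr[a][b] != 1:
--                     visited[a][b] = 1
--                     nxt.append((a,b))
--         frontier = nxt
--         move += 1
--     return -1,-1,-1
-- ===== Notes on version B (the rewrite author's own statement) =====
-- stated objective: alternative
-- what changed: A runs BFS over the whole reachable region with a (dist,x,y)-tagged queue, collects every guest it ever meets and finally sorts the full list by (dist,row,col); B processes the BFS one distance layer at a time and stops at the first layer containing a guest, returning min(row,col) of that layer, so it never explores past the nearest guest and never sorts.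
-- outside the precondition, e.g. on search(2, [[1]], 0, 0, [[0, 1], [1]]): A returns (0, 0, 0), B returns (0, 0, 0)
import Mathlib
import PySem

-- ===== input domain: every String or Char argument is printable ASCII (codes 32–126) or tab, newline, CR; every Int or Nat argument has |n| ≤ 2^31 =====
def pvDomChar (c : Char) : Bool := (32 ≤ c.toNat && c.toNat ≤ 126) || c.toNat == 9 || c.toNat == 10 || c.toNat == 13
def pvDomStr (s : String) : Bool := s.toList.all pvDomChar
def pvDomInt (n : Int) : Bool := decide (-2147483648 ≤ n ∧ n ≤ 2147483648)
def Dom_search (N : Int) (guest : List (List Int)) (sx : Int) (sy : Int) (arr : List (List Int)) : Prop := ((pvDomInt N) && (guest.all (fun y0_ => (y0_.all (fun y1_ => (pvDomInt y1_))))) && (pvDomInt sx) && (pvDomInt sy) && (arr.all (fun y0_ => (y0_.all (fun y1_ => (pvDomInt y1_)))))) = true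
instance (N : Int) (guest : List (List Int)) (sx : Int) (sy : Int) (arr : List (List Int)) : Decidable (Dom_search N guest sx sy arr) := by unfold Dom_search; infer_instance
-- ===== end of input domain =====

-- B replaces A's exhaustive BFS (traverse the whole reachable region collecting every guest, then
-- sort all of them by (dist,row,col)) by a layer-at-a-time BFS that stops at the first
-- distance layer containing a guest and takes min(row,col) inside that layer only.

-- ---- helpers shared by both ports (both Pythons index/update grids and test bounds the same way) ----

-- Python `g[x][y]` with a totalising default (Python raises exactly where pyGetD meets its default;
-- such inputs are outside Pre_search below, except for the default-1 visited reads, which are guarded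
-- by `is_inner` and a visited grid that is N×N whenever it is read).
def gridRead (g : List (List Int)) (x y : Int) (dflt : Int) : Int :=
  PySem.List.pyGetD (PySem.List.pyGetD g x []) y dflt

-- Python `g[x][y] = 1` as a functional update (pySetD/pyGetD carry Python's index semantics)
def gridSet1 (g : List (List Int)) (x y : Int) : List (List Int) :=
  PySem.List.pySetD g x (PySem.List.pySetD (PySem.List.pyGetD g x []) y 1)

-- number of 0 entries of a grid: the termination measure of both BFS loops
def zeros (g : List (List Int)) : Nat := (g.map (fun r => r.count 0)).sum

-- literal port of the helper `is_inner`
def is_inner (N x y : Int) : Bool :=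
  if 0 ≤ x ∧ x < N ∧ 0 ≤ y ∧ y < N then true else false

-- dx/dy of A zipped into one list; B iterates over the same four offsets
def dxy : List (Int × Int) := [(1, 0), (-1, 0), (0, 1), (0, -1)]


-- A's per-cell inner loop body (`for i in range(4): …` of A): mark & enqueue (move+1, a, b)
def stepA (N : Int) (arr : List (List Int)) (move x y : Int)
    (s : List (List Int) × List (Int × Int × Int)) (dd : Int × Int) :
    List (List Int) × List (Int × Int × Int) :=
  let a := x + dd.1
  let b := y + dd.2
  if is_inner N a b && (gridRead s.1 a b 1 == 0) && !(gridRead arr a b 0 == 1) then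
    (gridSet1 s.1 a b, s.2 ++ [(move + 1, a, b)])
  else s

-- B's per-cell inner loop body: mark & append (a, b) to the next frontier
def stepB (N : Int) (arr : List (List Int)) (x y : Int)
    (s : List (List Int) × List (Int × Int)) (dd : Int × Int) :
    List (List Int) × List (Int × Int) :=
  let a := x + dd.1
  let b := y + dd.2
  if is_inner N a b && (gridRead s.1 a b 1 == 0) && !(gridRead arr a b 0 == 1) then
    (gridSet1 s.1 a b, s.2 ++ [(a, b)])
  else s

-- ===== PORT A =====

-- A's `while d:` loop; queue entries are (move, x, y); acc is search_list (as triples).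
-- The Nat argument is pure fuel making the recursion structural; `search` passes more fuel than
-- the loop can consume (each pass either dequeues or also marks fresh cells), so the 0 branch is
-- never reached on any input (proved by searchLoopF_eq below).
def searchLoop (N : Int) (guest arr : List (List Int)) :
    Nat → List (Int × Int × Int) → List (List Int) → List (Int × Int × Int) → List (Int × Int × Int)
  | 0, _, _, acc => acc
  | _ + 1, [], _, acc => acc
  | fuel + 1, (move, x, y) :: rest, v, acc =>
    let acc' := if !(gridRead guest x y 0 == 0) then acc ++ [(move, x, y)] else acc
    let vq := dxy.foldl (stepA N arr move x y) (v, [])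
    searchLoop N guest arr fuel (rest ++ vq.2) vq.1 acc'

-- Python's `sorted(search_list, key=lambda x: (x[0],x[1],x[2]))[0]` guarded by `if search_list:`
def searchFinish (acc : List (Int × Int × Int)) : Int × Int × Int :=
  match PySem.List.sorted acc (fun t => toLex (t.1, toLex (t.2.1, t.2.2))) with
  | [] => (-1, -1, -1)
  | (Z, X, Y) :: _ => (X, Y, Z)

def search (N : Int) (guest : List (List Int)) (sx : Int) (sy : Int) (arr : List (List Int)) : Int × Int × Int :=
  let visited := gridSet1 (List.replicate N.toNat (List.replicate N.toNat (0 : Int))) sx sy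
  searchFinish (searchLoop N guest arr (4 * zeros visited + 2) [(0, sx, sy)] visited [])

-- ===== PORT B =====

-- B's `while frontier:` loop, one full distance layer at a time; the Nat argument is fuel exactly
-- as in searchLoop (never exhausted: each non-final layer marks at least one fresh cell).
def searchAltLoop (N : Int) (guest arr : List (List Int)) :
    Nat → List (Int × Int) → List (List Int) → Int → Int × Int × Int
  | 0, _, _, _ => (-1, -1, -1)
  | _ + 1, [], _, _ => (-1, -1, -1)
  | fuel + 1, c :: f, v, move =>
    let hits := ((c :: f).filter (fun c => !(gridRead guest c.1 c.2 0 == 0)))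
    match PySem.List.min? hits (fun p => toLex p) with
    | some m => (m.1, m.2, move)
    | none =>
      let vn := (c :: f).foldl (fun s c => dxy.foldl (stepB N arr c.1 c.2) s) (v, [])
      searchAltLoop N guest arr fuel vn.2 vn.1 (move + 1)

def search_alt (N : Int) (guest : List (List Int)) (sx : Int) (sy : Int) (arr : List (List Int)) : Int × Int × Int :=
  let visited := gridSet1 (List.replicate N.toNat (List.replicate N.toNat (0 : Int))) sx sy
  searchAltLoop N guest arr (zeros visited + 2) [(sx, sy)] visited 0

-- ===== PRECONDITION & SPEC =====
-- Pre_search excludes exactly the inputs where the Python raises an IndexError: a start cell outside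
-- the visited grid, an invalid start read of `guest`, and ragged `guest`/`arr` grids (missing rows, or
-- rows shorter than N). On some ragged grids A happens to return anyway because walls or raggedness
-- stop the BFS before it touches a missing entry; deciding that would require running the BFS, so
-- Pre_search conservatively demands a well-formed N×N prefix — except when the raw (possibly
-- negative) start coordinates isolate the start cell, in which case nothing else is read.
def Pre_search (N : Int) (guest : List (List Int)) (sx : Int) (sy : Int) (arr : List (List Int)) : Prop :=
  1 ≤ N ∧ -N ≤ sx ∧ sx < N ∧ -N ≤ sy ∧ sy < N ∧
  PySem.Raise.InRange guest.length sx ∧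
  PySem.Raise.InRange (PySem.List.pyGetD guest sx []).length sy ∧
  ((N ≤ (guest.length : Int) ∧ (∀ r ∈ guest.take N.toNat, N ≤ (r.length : Int)) ∧
      N ≤ (arr.length : Int) ∧ (∀ r ∈ arr.take N.toNat, N ≤ (r.length : Int))) ∨
    (sx ≤ -2 ∨ sy ≤ -2 ∨ (sx = -1 ∧ sy = -1)))
instance (N : Int) (guest : List (List Int)) (sx : Int) (sy : Int) (arr : List (List Int)) : Decidable (Pre_search N guest sx sy arr) := by unfold Pre_search; infer_instance

def pvWitness_search : Int × List (List Int) × Int × Int × List (List Int) :=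
  (2, [[0, 0], [0, 1]], 0, 0, [[0, 0], [1, 0]])

def Spec_search (N : Int) (guest : List (List Int)) (sx : Int) (sy : Int) (arr : List (List Int)) (out : Int × Int × Int) : Prop := out = search_alt N guest sx sy arr
instance (N : Int) (guest : List (List Int)) (sx : Int) (sy : Int) (arr : List (List Int)) (out : Int × Int × Int) : Decidable (Spec_search N guest sx sy arr out) := by unfold Spec_search; infer_instance

-- ===== CLAIM (what is proved, stated in full; the proofs are below) =====
def Claim_equal_search : Prop := ∀ (N : Int) (guest : List (List Int)) (sx : Int) (sy : Int) (arr : List (List Int)), Dom_search N guest sx sy arr → Pre_search N guest sx sy arr → Spec_search N guest sx sy arr (search N guest sx sy arr)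

-- ===== LEMMAS AND PROOFS =====

lemma sum_set_nat (ns : List Nat) (i : Nat) (b : Nat) (h : i < ns.length) :
    (ns.set i b).sum + ns[i] = ns.sum + b := by
  induction ns generalizing i with
  | nil => simp at h
  | cons n ns ih =>
    cases i with
    | zero => simp [List.sum_cons]; omega
    | succ i =>
      simp only [List.set_cons_succ, List.sum_cons, List.getElem_cons_succ]
      have := ih i (by simpa using h)
      omega

lemma count_set_zero (l : List Int) (j : Nat) (h : j < l.length) (h0 : l[j] = 0) :
    (l.set j (1:Int)).count 0 + 1 = l.count 0 := by
  have hd : l = List.take j l ++ l[j] :: List.drop (j+1) l := by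
    rw [List.getElem_cons_drop, List.take_append_drop]
  rw [List.set_eq_take_append_cons_drop, if_pos h]
  conv_rhs => rw [hd]
  simp [List.count_append, h0]
  omega

lemma zeros_gridSet1_lt (v : List (List Int)) (a b : Int) (ha : 0 ≤ a) (hb : 0 ≤ b)
    (h : gridRead v a b 1 = 0) : zeros (gridSet1 v a b) < zeros v := by
  unfold gridRead at h
  have hain : a < (v.length : Int) := by
    by_contra hx
    have h1 : PySem.List.pyGetD v a [] = ([] : List Int) := PySem.List.pyGetD_of_none _ _ _ (by
      rw [PySem.List.pyGet?_eq_none_iff]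
      intro hr
      exact hx hr.2)
    rw [h1] at h
    have h2 : PySem.List.pyGetD ([] : List Int) b 1 = 1 := PySem.List.pyGetD_of_none _ _ _ (by
      rw [PySem.List.pyGet?_eq_none_iff]
      intro hr
      have := hr.2
      simp at this
      omega)
    rw [h2] at h
    exact one_ne_zero h
  have hrow : PySem.List.pyGetD v a [] = v[a.toNat] := PySem.List.pyGetD_eq_getElem v [] ha hain
  rw [hrow] at h
  have hbin : b < (v[a.toNat].length : Int) := by
    by_contra hx
    rw [PySem.List.pyGetD_of_none _ _ _ (by
      rw [PySem.List.pyGet?_eq_none_iff]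
      intro hr
      exact hx (hr.2))] at h
    norm_num at h
  have hval : v[a.toNat][b.toNat] = 0 := by
    rw [PySem.List.pyGetD_eq_getElem _ _ hb hbin] at h
    exact h
  have hset : gridSet1 v a b = v.set a.toNat (v[a.toNat].set b.toNat 1) := by
    unfold gridSet1
    rw [PySem.List.pySetD_of_nonneg _ _ ha, hrow, PySem.List.pySetD_of_nonneg _ _ hb]
  have haN : a.toNat < v.length := by omega
  have hbN : b.toNat < v[a.toNat].length := by omega
  rw [hset]
  unfold zeros
  rw [List.map_set]
  have hsum := sum_set_nat (v.map (fun r => r.count 0)) a.toNat ((v[a.toNat].set b.toNat 1).count 0)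
    (by simpa using haN)
  rw [List.getElem_map] at hsum
  have hcnt := count_set_zero v[a.toNat] b.toNat hbN hval
  omega

lemma stepA_measure (N : Int) (arr : List (List Int)) (move x y : Int)
    (s : List (List Int) × List (Int × Int × Int)) (dd : Int × Int) :
    4 * zeros (stepA N arr move x y s dd).1 + (stepA N arr move x y s dd).2.length ≤
      4 * zeros s.1 + s.2.length := by
  simp only [stepA]
  by_cases h : (is_inner N (x + dd.1) (y + dd.2) && (gridRead s.1 (x + dd.1) (y + dd.2) 1 == 0) &&
      !(gridRead arr (x + dd.1) (y + dd.2) 0 == 1)) = true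
  · rw [if_pos h]
    simp only [Bool.and_eq_true, beq_iff_eq] at h
    have hin : (0 ≤ x + dd.1 ∧ x + dd.1 < N ∧ 0 ≤ y + dd.2 ∧ y + dd.2 < N) := by
      have := h.1.1
      unfold is_inner at this
      by_contra hc
      rw [if_neg hc] at this
      exact Bool.false_ne_true this
    have hz := zeros_gridSet1_lt s.1 (x + dd.1) (y + dd.2) hin.1 hin.2.2.1 h.1.2
    simp only [List.length_append, List.length_cons, List.length_nil]
    omega
  · rw [if_neg h]

lemma foldA_measure (N : Int) (arr : List (List Int)) (move x y : Int)
    (ds : List (Int × Int)) (s : List (List Int) × List (Int × Int × Int)) :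
    4 * zeros (ds.foldl (stepA N arr move x y) s).1 + (ds.foldl (stepA N arr move x y) s).2.length ≤
      4 * zeros s.1 + s.2.length := by
  induction ds generalizing s with
  | nil => simp
  | cons d ds ih => exact le_trans (ih _) (stepA_measure N arr move x y s d)

lemma stepB_measure (N : Int) (arr : List (List Int)) (x y : Int)
    (s : List (List Int) × List (Int × Int)) (dd : Int × Int) :
    zeros (stepB N arr x y s dd).1 + (stepB N arr x y s dd).2.length ≤ zeros s.1 + s.2.length := by
  simp only [stepB]
  by_cases h : (is_inner N (x + dd.1) (y + dd.2) && (gridRead s.1 (x + dd.1) (y + dd.2) 1 == 0) &&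
      !(gridRead arr (x + dd.1) (y + dd.2) 0 == 1)) = true
  · rw [if_pos h]
    simp only [Bool.and_eq_true, beq_iff_eq] at h
    have hin : (0 ≤ x + dd.1 ∧ x + dd.1 < N ∧ 0 ≤ y + dd.2 ∧ y + dd.2 < N) := by
      have := h.1.1
      unfold is_inner at this
      by_contra hc
      rw [if_neg hc] at this
      exact Bool.false_ne_true this
    have hz := zeros_gridSet1_lt s.1 (x + dd.1) (y + dd.2) hin.1 hin.2.2.1 h.1.2
    simp only [List.length_append, List.length_cons, List.length_nil]
    omega
  · rw [if_neg h]

lemma foldB_measure (N : Int) (arr : List (List Int)) (x y : Int)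
    (ds : List (Int × Int)) (s : List (List Int) × List (Int × Int)) :
    zeros (ds.foldl (stepB N arr x y) s).1 + (ds.foldl (stepB N arr x y) s).2.length ≤
      zeros s.1 + s.2.length := by
  induction ds generalizing s with
  | nil => simp
  | cons d ds ih => exact le_trans (ih _) (stepB_measure N arr x y s d)

lemma cellsB_measure (N : Int) (arr : List (List Int)) (f : List (Int × Int))
    (s : List (List Int) × List (Int × Int)) :
    zeros (f.foldl (fun s c => dxy.foldl (stepB N arr c.1 c.2) s) s).1 +
      (f.foldl (fun s c => dxy.foldl (stepB N arr c.1 c.2) s) s).2.length ≤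
      zeros s.1 + s.2.length := by
  induction f generalizing s with
  | nil => simp
  | cons c f ih => exact le_trans (ih _) (foldB_measure N arr c.1 c.2 dxy s)

lemma searchLoop_dec (N : Int) (arr : List (List Int)) (move x y : Int)
    (v : List (List Int)) (rest : List (Int × Int × Int)) :
    4 * zeros (dxy.foldl (stepA N arr move x y) (v, [])).1 +
      (rest ++ (dxy.foldl (stepA N arr move x y) (v, [])).2).length <
      4 * zeros v + ((move, x, y) :: rest).length := by
  have h := foldA_measure N arr move x y dxy (v, [])
  simp only [List.length_append, List.length_cons, List.length_nil] at h ⊢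
  omega

lemma altLoop_dec (N : Int) (arr : List (List Int)) (c : Int × Int) (f : List (Int × Int))
    (v : List (List Int)) :
    zeros ((c :: f).foldl (fun s c => dxy.foldl (stepB N arr c.1 c.2) s) (v, [])).1 +
      ((c :: f).foldl (fun s c => dxy.foldl (stepB N arr c.1 c.2) s) (v, [])).2.length <
      zeros v + (c :: f).length := by
  have h := cellsB_measure N arr (c :: f) (v, [])
  simp only [List.length_cons, List.length_nil] at h ⊢
  omega

-- A's `while d:` loop; queue entries are (move, x, y); acc is search_list (as triples)
def searchLoopW (N : Int) (guest arr : List (List Int)) :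
    List (Int × Int × Int) → List (List Int) → List (Int × Int × Int) → List (Int × Int × Int)
  | [], _, acc => acc
  | (move, x, y) :: rest, v, acc =>
    let acc' := if !(gridRead guest x y 0 == 0) then acc ++ [(move, x, y)] else acc
    let vq := dxy.foldl (stepA N arr move x y) (v, [])
    searchLoopW N guest arr (rest ++ vq.2) vq.1 acc'
  termination_by q v _ => 4 * zeros v + q.length
  decreasing_by exact searchLoop_dec N arr move x y v rest

-- B's `while frontier:` loop, one full distance layer at a time
def searchAltLoopW (N : Int) (guest arr : List (List Int)) :
    List (Int × Int) → List (List Int) → Int → Int × Int × Int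
  | [], _, _ => (-1, -1, -1)
  | c :: f, v, move =>
    let hits := ((c :: f).filter (fun c => !(gridRead guest c.1 c.2 0 == 0)))
    match PySem.List.min? hits (fun p => toLex p) with
    | some m => (m.1, m.2, move)
    | none =>
      let vn := (c :: f).foldl (fun s c => dxy.foldl (stepB N arr c.1 c.2) s) (v, [])
      searchAltLoopW N guest arr vn.2 vn.1 (move + 1)
  termination_by f v _ => zeros v + f.length
  decreasing_by exact altLoop_dec N arr c f v


lemma searchLoopF_eq (N : Int) (guest arr : List (List Int)) :
    ∀ (fuel : Nat) (q : List (Int × Int × Int)) (v : List (List Int)) (acc : List (Int × Int × Int)),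
      4 * zeros v + q.length < fuel →
      searchLoop N guest arr fuel q v acc = searchLoopW N guest arr q v acc := by
  intro fuel
  induction fuel with
  | zero => intro q v acc h; omega
  | succ fuel ih =>
    intro q v acc h
    match q with
    | [] => rw [searchLoop, searchLoopW]
    | (move, x, y) :: rest =>
      rw [searchLoop, searchLoopW]
      apply ih
      have hm := foldA_measure N arr move x y dxy (v, [])
      simp only [List.length_nil, List.length_append, List.length_cons] at hm h ⊢
      omega

lemma altLoopF_eq (N : Int) (guest arr : List (List Int)) :
    ∀ (fuel : Nat) (f : List (Int × Int)) (v : List (List Int)) (move : Int),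
      zeros v + f.length < fuel →
      searchAltLoop N guest arr fuel f v move = searchAltLoopW N guest arr f v move := by
  intro fuel
  induction fuel with
  | zero => intro f v move h; omega
  | succ fuel ih =>
    intro f v move h
    match f with
    | [] => rw [searchAltLoop, searchAltLoopW]
    | c :: f =>
      rw [searchAltLoop, searchAltLoopW]
      cases PySem.List.min? ((c :: f).filter (fun c => !(gridRead guest c.1 c.2 0 == 0)))
          (fun p => toLex p) with
      | some m => rfl
      | none =>
        apply ih
        have hm := cellsB_measure N arr (c :: f) (v, [])
        simp only [List.length_nil, List.length_cons] at hm h ⊢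
        omega


-- tag a cell with its BFS distance, as A's queue and search_list do
def tag (d : Int) (c : Int × Int) : Int × Int × Int := (d, c.1, c.2)

-- one full layer expansion, as B performs it
def cellsB (N : Int) (arr : List (List Int)) (f : List (Int × Int))
    (s : List (List Int) × List (Int × Int)) : List (List Int) × List (Int × Int) :=
  f.foldl (fun s c => dxy.foldl (stepB N arr c.1 c.2) s) s

-- the concatenated list of (distance, row, col) of the guests met in each successive BFS layer
def guestLayers (N : Int) (guest arr : List (List Int)) :
    List (Int × Int) → List (List Int) → Int → List (Int × Int × Int)
  | [], _, _ => []
  | c :: f, v, d =>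
    (((c :: f).filter (fun c => !(gridRead guest c.1 c.2 0 == 0))).map (tag d)) ++
      guestLayers N guest arr (cellsB N arr (c :: f) (v, [])).2 (cellsB N arr (c :: f) (v, [])).1 (d + 1)
  termination_by f v _ => zeros v + f.length
  decreasing_by exact altLoop_dec N arr c f v

lemma stepB_seed (N : Int) (arr : List (List Int)) (x y : Int) (ds : List (Int × Int)) :
    ∀ (v : List (List Int)) (p : List (Int × Int)),
      ds.foldl (stepB N arr x y) (v, p) =
        ((ds.foldl (stepB N arr x y) (v, [])).1, p ++ (ds.foldl (stepB N arr x y) (v, [])).2) := by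
  induction ds with
  | nil => simp
  | cons d ds ih =>
    intro v p
    simp only [List.foldl_cons, stepB]
    by_cases h : (is_inner N (x + d.1) (y + d.2) &&
        (gridRead v (x + d.1) (y + d.2) 1 == 0) && !(gridRead arr (x + d.1) (y + d.2) 0 == 1)) = true
    · rw [if_pos h, if_pos h]
      simp only [List.nil_append]
      rw [ih (gridSet1 v (x + d.1) (y + d.2)) (p ++ [(x + d.1, y + d.2)]),
          ih (gridSet1 v (x + d.1) (y + d.2)) [(x + d.1, y + d.2)]]
      simp
    · rw [if_neg h, if_neg h]
      exact ih v p

lemma fold_corr (N : Int) (arr : List (List Int)) (move x y : Int) (ds : List (Int × Int)) :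
    ∀ (v : List (List Int)) (q : List (Int × Int × Int)),
      ds.foldl (stepA N arr move x y) (v, q) =
        ((ds.foldl (stepB N arr x y) (v, [])).1,
          q ++ ((ds.foldl (stepB N arr x y) (v, [])).2).map (tag (move + 1))) := by
  induction ds with
  | nil => simp
  | cons d ds ih =>
    intro v q
    simp only [List.foldl_cons, stepA, stepB]
    by_cases h : (is_inner N (x + d.1) (y + d.2) &&
        (gridRead v (x + d.1) (y + d.2) 1 == 0) && !(gridRead arr (x + d.1) (y + d.2) 0 == 1)) = true
    · rw [if_pos h, if_pos h]
      simp only [List.nil_append]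
      rw [ih (gridSet1 v (x + d.1) (y + d.2)) (q ++ [(move + 1, x + d.1, y + d.2)]),
          stepB_seed N arr x y ds (gridSet1 v (x + d.1) (y + d.2)) [(x + d.1, y + d.2)]]
      simp [tag]
    · rw [if_neg h, if_neg h]
      exact ih v q

lemma layer_step (N : Int) (guest arr : List (List Int)) (d : Int) (F : List (Int × Int)) :
    ∀ (v : List (List Int)) (G : List (Int × Int)) (acc : List (Int × Int × Int)),
      searchLoopW N guest arr (F.map (tag d) ++ G.map (tag (d + 1))) v acc =
        searchLoopW N guest arr ((cellsB N arr F (v, G)).2.map (tag (d + 1))) (cellsB N arr F (v, G)).1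
          (acc ++ (F.filter (fun c => !(gridRead guest c.1 c.2 0 == 0))).map (tag d)) := by
  induction F with
  | nil => intro v G acc; simp [cellsB]
  | cons c F ih =>
    intro v G acc
    simp only [List.map_cons, tag, List.cons_append, searchLoopW]
    rw [fold_corr N arr d c.1 c.2 dxy v []]
    simp only [List.nil_append]
    have hq : (F.map (tag d) ++ G.map (tag (d + 1))) ++
        ((dxy.foldl (stepB N arr c.1 c.2) (v, [])).2).map (tag (d + 1)) =
        F.map (tag d) ++ (G ++ (dxy.foldl (stepB N arr c.1 c.2) (v, [])).2).map (tag (d + 1)) := by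
      simp
    rw [hq, ih]
    have hcells : cellsB N arr (c :: F) (v, G) =
        cellsB N arr F (((dxy.foldl (stepB N arr c.1 c.2) (v, [])).1,
          G ++ (dxy.foldl (stepB N arr c.1 c.2) (v, [])).2)) := by
      simp only [cellsB, List.foldl_cons]
      rw [stepB_seed]
    rw [← hcells]
    by_cases hg : (!(gridRead guest c.1 c.2 0 == 0)) = true
    · simp [hg, tag]
    · simp [hg]

lemma A_layers (N : Int) (guest arr : List (List Int)) (f : List (Int × Int)) (v : List (List Int)) (d : Int) :
    ∀ acc, searchLoopW N guest arr (f.map (tag d)) v acc = acc ++ guestLayers N guest arr f v d := by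
  induction f, v, d using guestLayers.induct N arr with
  | case1 v d => intro acc; simp [guestLayers, searchLoopW]
  | case2 c f v d ih =>
    intro acc
    have hstep := layer_step N guest arr d (c :: f) v [] acc
    simp only [List.map_nil, List.append_nil] at hstep
    rw [hstep, ih]
    rw [guestLayers]
    simp

lemma layers_tag_ge (N : Int) (guest arr : List (List Int)) (f : List (Int × Int)) (v : List (List Int)) (d : Int) :
    ∀ t ∈ guestLayers N guest arr f v d, d ≤ t.1 := by
  induction f, v, d using guestLayers.induct N arr with
  | case1 v d => simp [guestLayers]
  | case2 c f v d ih =>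
    intro t ht
    rw [guestLayers] at ht
    rcases List.mem_append.mp ht with hA | hB
    · obtain ⟨c', _, rfl⟩ := List.mem_map.mp hA
      simp [tag]
    · have := ih t hB
      omega

lemma sorted_head_min {α κ : Type} [LinearOrder κ] (xs : List α) (key : α → κ) (h : α) (t' : List α)
    (hs : PySem.List.sorted xs key = h :: t') : h ∈ xs ∧ ∀ y ∈ xs, key h ≤ key y := by
  have hperm := PySem.List.sorted_perm xs key false
  have hpw := PySem.List.sorted_pairwise xs key
  rw [hs] at hperm hpw
  constructor
  · exact hperm.mem_iff.mp (by simp)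
  · intro y hy
    have hy' : y ∈ h :: t' := hperm.mem_iff.mpr hy
    rcases List.mem_cons.mp hy' with rfl | hyt
    · exact le_refl _
    · exact (List.pairwise_cons.mp hpw).1 y hyt

lemma key3_inj {a b : Int × Int × Int}
    (h : toLex (a.1, toLex (a.2.1, a.2.2)) = toLex (b.1, toLex (b.2.1, b.2.2))) : a = b := by
  have h1 : (a.1, toLex (a.2.1, a.2.2)) = (b.1, toLex (b.2.1, b.2.2)) := toLex.injective h
  have h2 : a.1 = b.1 := congrArg Prod.fst h1
  have h3 : toLex (a.2.1, a.2.2) = toLex (b.2.1, b.2.2) := congrArg Prod.snd h1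
  have h4 : (a.2.1, a.2.2) = (b.2.1, b.2.2) := toLex.injective h3
  have h5 : a.2.1 = b.2.1 := congrArg Prod.fst h4
  have h6 : a.2.2 = b.2.2 := congrArg Prod.snd h4
  exact Prod.ext h2 (Prod.ext h5 h6)

lemma finish_first_layer (hits : List (Int × Int)) (rest : List (Int × Int × Int)) (move : Int)
    (m : Int × Int) (hmin : PySem.List.min? hits (fun p => toLex p) = some m)
    (hrest : ∀ t ∈ rest, move + 1 ≤ t.1) :
    searchFinish (hits.map (tag move) ++ rest) = (m.1, m.2, move) := by
  have hmem : m ∈ hits := PySem.List.min?_mem hmin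
  have hmins : ∀ y ∈ hits, (fun p => toLex p) m ≤ (fun p => toLex p) y := PySem.List.min?_isMin hmin
  have hLne : hits.map (tag move) ++ rest ≠ [] := by
    cases hits with
    | nil => simp at hmem
    | cons a l => simp
  unfold searchFinish
  cases hs : PySem.List.sorted (hits.map (tag move) ++ rest)
      (fun t => toLex (t.1, toLex (t.2.1, t.2.2))) with
  | nil => exact absurd ((PySem.List.sorted_eq_nil_iff _ _ _).mp hs) hLne
  | cons h0 t' =>
    obtain ⟨hh0mem, hh0min⟩ := sorted_head_min _ _ h0 t' hs
    have he : tag move m ∈ hits.map (tag move) ++ rest :=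
      List.mem_append_left _ (List.mem_map_of_mem hmem)
    have h1 := hh0min _ he
    have h2 : toLex ((tag move m).1, toLex ((tag move m).2.1, (tag move m).2.2)) ≤
        toLex (h0.1, toLex (h0.2.1, h0.2.2)) := by
      rcases List.mem_append.mp hh0mem with hA | hB
      · obtain ⟨c, hc, rfl⟩ := List.mem_map.mp hA
        rw [Prod.Lex.toLex_le_toLex]
        right
        exact ⟨rfl, hmins c hc⟩
      · have hd := hrest h0 hB
        rw [Prod.Lex.toLex_le_toLex]
        left
        simp only [tag]
        omega
    have h0eq : h0 = tag move m := key3_inj (le_antisymm h1 h2)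
    rw [h0eq]
    rfl

lemma B_finish (N : Int) (guest arr : List (List Int)) (f : List (Int × Int)) (v : List (List Int)) (d : Int) :
    searchAltLoopW N guest arr f v d = searchFinish (guestLayers N guest arr f v d) := by
  induction f, v, d using guestLayers.induct N arr with
  | case1 v d =>
    rw [searchAltLoopW, guestLayers]
    unfold searchFinish
    rw [show PySem.List.sorted ([] : List (Int × Int × Int))
      (fun t => toLex (t.1, toLex (t.2.1, t.2.2))) = [] from (PySem.List.sorted_eq_nil_iff _ _ _).mpr rfl]
  | case2 c f v d ih =>
    rw [searchAltLoopW, guestLayers]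
    cases hmin : PySem.List.min?
        ((c :: f).filter (fun c => !(gridRead guest c.1 c.2 0 == 0))) (fun p => toLex p) with
    | none =>
      have hnil : (c :: f).filter (fun c => !(gridRead guest c.1 c.2 0 == 0)) = [] :=
        (PySem.List.min?_eq_none_iff _ _).mp hmin
      simp only [hnil, List.map_nil, List.nil_append]
      exact ih
    | some m =>
      rw [finish_first_layer _ _ _ _ hmin
        (fun t ht => layers_tag_ge N guest arr _ _ _ t ht)]

-- ===== VERDICT (by name: the statement is the Claim_ definition above) =====
theorem search_spec : Claim_equal_search := by
  intro N guest sx sy arr _ _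
  unfold Spec_search search search_alt
  dsimp only
  rw [searchLoopF_eq N guest arr _ _ _ _ (by simp only [List.length_cons, List.length_nil]; omega),
      altLoopF_eq N guest arr _ _ _ _ (by simp only [List.length_cons, List.length_nil]; omega)]
  rw [show [((0:Int), sx, sy)] = ([(sx, sy)]).map (tag 0) by simp [tag]]
  rw [A_layers, B_finish]
  simp
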